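-- pv_equiv track=rewrite | github.com/bagherilab/arcade-collection | src/arcade_collection/input/group_template_conditions.py | group_condition_sets
-- ===== SOURCE A (Python) =====
-- def group_condition_sets(conditions: list[dict], max_seeds: int) -> list[list[dict]]:
--     """
--     Group conditions, with total seeds no larger than specified max seeds.
--
--     Parameters
--     ----------
--     conditions
--         List of conditions, containing a unique "key" with "start_seed" and
--         "end_seed" ranges.
--     max_seeds
--         Maximum number of seeds in a single group.
--
--     Returns
--     -------
--     :
--         List of groups of conditions.
--     """
--
--     seed_count = 0
--     condition_set = []
--     condition_sets = []
--
--     for condition in conditions: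
--         num_seeds = condition["end_seed"] - condition["start_seed"] + 1
--
--         if seed_count + num_seeds <= max_seeds:
--             condition_set.append(condition)
--             seed_count = seed_count + num_seeds
--         else:
--             condition_sets.append(condition_set)
--             seed_count = num_seeds
--             condition_set = [condition]
--
--     condition_sets.append(condition_set)
--
--     return condition_sets
-- ===== SOURCE B (Python) =====
-- def group_condition_sets(conditions: list[dict], max_seeds: int) -> list[list[dict]]:
--     """Two-pass variant: record group-start boundaries, then slice the list."""
--     boundaries = [0]
--     seed_count = 0
--     for index, condition in enumerate(conditions):
--         num_seeds = condition["end_seed"] - condition["start_seed"] + 1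
--         if seed_count + num_seeds > max_seeds:
--             boundaries.append(index)
--             seed_count = num_seeds
--         else:
--             seed_count += num_seeds
--     boundaries.append(len(conditions))
--     return [conditions[a:b] for a, b in zip(boundaries, boundaries[1:])]
-- ===== Notes on version B (the rewrite author's own statement) =====
-- stated objective: alternative
-- what changed: A builds the groups directly in one accumulate-and-flush loop; B first records only the start indices (boundaries) of the groups in one pass and then materialises the groups as consecutive slices of the input list.
import Mathlib
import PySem

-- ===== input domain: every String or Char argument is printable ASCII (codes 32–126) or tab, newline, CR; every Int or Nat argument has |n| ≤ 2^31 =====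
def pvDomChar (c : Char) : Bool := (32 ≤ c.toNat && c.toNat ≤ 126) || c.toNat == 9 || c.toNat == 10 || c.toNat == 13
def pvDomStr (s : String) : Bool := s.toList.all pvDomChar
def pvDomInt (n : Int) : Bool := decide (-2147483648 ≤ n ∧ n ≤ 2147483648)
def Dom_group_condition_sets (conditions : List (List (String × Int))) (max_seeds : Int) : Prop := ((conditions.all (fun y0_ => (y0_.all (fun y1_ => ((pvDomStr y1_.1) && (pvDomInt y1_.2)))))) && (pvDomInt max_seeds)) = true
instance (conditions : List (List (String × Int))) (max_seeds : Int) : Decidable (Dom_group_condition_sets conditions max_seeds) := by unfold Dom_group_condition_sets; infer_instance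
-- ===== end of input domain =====

-- B replaces A's single accumulate-and-flush loop by two passes — record group-start
-- boundaries, then slice the list at them — as a clearer decomposition (no speed claim).

-- num_seeds = condition["end_seed"] - condition["start_seed"] + 1  (dict lookup; KeyError excluded by Pre_)
def pvNumSeeds (condition : List (String × Int)) : Int :=
  PySem.Dict.getD (PySem.Dict.mk condition) "end_seed" 0 -
    PySem.Dict.getD (PySem.Dict.mk condition) "start_seed" 0 + 1

-- ===== PORT A =====
-- the body of A's for-loop over (seed_count, condition_set, condition_sets)
def gcsStepA (max_seeds : Int)
    (st : Int × List (List (String × Int)) × List (List (List (String × Int))))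
    (condition : List (String × Int)) :
    Int × List (List (String × Int)) × List (List (List (String × Int))) :=
  let num_seeds := pvNumSeeds condition
  if st.1 + num_seeds ≤ max_seeds then
    (st.1 + num_seeds, st.2.1 ++ [condition], st.2.2)
  else
    (num_seeds, [condition], st.2.2 ++ [st.2.1])

def group_condition_sets (conditions : List (List (String × Int))) (max_seeds : Int) :
    List (List (List (String × Int))) :=
  let s := conditions.foldl (gcsStepA max_seeds) (0, [], [])
  s.2.2 ++ [s.2.1]

-- ===== PORT B =====
-- the body of B's boundary-recording loop over (boundaries, seed_count)
def gcsStepB (max_seeds : Int) (st : List Int × Int) (ic : Int × List (String × Int)) :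
    List Int × Int :=
  let num_seeds := pvNumSeeds ic.2
  if st.2 + num_seeds > max_seeds then (st.1 ++ [ic.1], num_seeds)
  else (st.1, st.2 + num_seeds)

def group_condition_sets_alt (conditions : List (List (String × Int))) (max_seeds : Int) :
    List (List (List (String × Int))) :=
  let st := (PySem.List.enumerate conditions 0).foldl (gcsStepB max_seeds) ([0], 0)
  let boundaries := st.1 ++ [(conditions.length : Int)]
  (boundaries.zip boundaries.tail).map
    (fun ab => PySem.List.slice conditions (some ab.1) (some ab.2))

-- ===== PRECONDITION & SPEC =====
-- Pre_ excludes exactly the inputs where Python A raises KeyError: a condition dict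
-- missing "start_seed" or "end_seed".
def Pre_group_condition_sets (conditions : List (List (String × Int))) (max_seeds : Int) : Prop :=
  conditions.all (fun c => (PySem.Dict.mk c).contains "start_seed" &&
    (PySem.Dict.mk c).contains "end_seed") = true
instance (conditions : List (List (String × Int))) (max_seeds : Int) : Decidable (Pre_group_condition_sets conditions max_seeds) := by unfold Pre_group_condition_sets; infer_instance

def pvWitness_group_condition_sets : (List (List (String × Int))) × Int :=
  ([[("key", 1), ("start_seed", 0), ("end_seed", 2)],
    [("key", 2), ("start_seed", 3), ("end_seed", 5)]], 4)

def Spec_group_condition_sets (conditions : List (List (String × Int))) (max_seeds : Int) (out : List (List (List (String × Int)))) : Prop := out = group_condition_sets_alt conditions max_seeds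
instance (conditions : List (List (String × Int))) (max_seeds : Int) (out : List (List (List (String × Int)))) : Decidable (Spec_group_condition_sets conditions max_seeds out) := by unfold Spec_group_condition_sets; infer_instance

-- ===== CLAIM (what is proved, stated in full; the proofs are below) =====
def Claim_equal_group_condition_sets : Prop := ∀ (conditions : List (List (String × Int))) (max_seeds : Int), Dom_group_condition_sets conditions max_seeds → Pre_group_condition_sets conditions max_seeds → Spec_group_condition_sets conditions max_seeds (group_condition_sets conditions max_seeds)

-- ===== LEMMAS AND PROOFS =====

-- A's fold result packaged as the returned group list
def outA (m : Int) (cs : List (List (String × Int))) (sc : Int)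
    (cur : List (List (String × Int))) (acc : List (List (List (String × Int)))) :
    List (List (List (String × Int))) :=
  let s := cs.foldl (gcsStepA m) (sc, cur, acc)
  s.2.2 ++ [s.2.1]

-- the pure boundary list B's first pass computes, as structural recursion
def boundsOf (m : Int) (cs : List (List (String × Int))) (i : Int) (sc : Int) : List Int :=
  match cs with
  | [] => []
  | c :: cs' =>
    if sc + pvNumSeeds c > m then i :: boundsOf m cs' (i + 1) (pvNumSeeds c)
    else boundsOf m cs' (i + 1) (sc + pvNumSeeds c)

-- the final seed_count of B's first pass (carried only to state the fold as a pair)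
def scOf (m : Int) (cs : List (List (String × Int))) (sc : Int) : Int :=
  match cs with
  | [] => sc
  | c :: cs' =>
    if sc + pvNumSeeds c > m then scOf m cs' (pvNumSeeds c)
    else scOf m cs' (sc + pvNumSeeds c)

-- B's second pass (consecutive slices), abstracted over the boundary list
def zipSlices (L : List (List (String × Int))) (bs : List Int) :
    List (List (List (String × Int))) :=
  (bs.zip bs.tail).map (fun ab => PySem.List.slice L (some ab.1) (some ab.2))

-- prepend a partial group onto the head group
def consHead (cur : List (List (String × Int))) (l : List (List (List (String × Int)))) :
    List (List (List (String × Int))) :=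
  match l with
  | [] => [cur]
  | g :: gs => (cur ++ g) :: gs

theorem outA_nil (m : Int) (sc : Int) (cur : List (List (String × Int)))
    (acc : List (List (List (String × Int)))) : outA m [] sc cur acc = acc ++ [cur] := rfl

theorem outA_cons (m : Int) (c : List (String × Int)) (cs : List (List (String × Int)))
    (sc : Int) (cur : List (List (String × Int))) (acc : List (List (List (String × Int)))) :
    outA m (c :: cs) sc cur acc =
      if sc + pvNumSeeds c ≤ m then outA m cs (sc + pvNumSeeds c) (cur ++ [c]) acc
      else outA m cs (pvNumSeeds c) [c] (acc ++ [cur]) := by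
  simp only [outA, List.foldl_cons, gcsStepA]
  split <;> rfl

theorem outA_acc (m : Int) (cs : List (List (String × Int))) :
    ∀ sc cur acc, outA m cs sc cur acc = acc ++ outA m cs sc cur [] := by
  induction cs with
  | nil => intro sc cur acc; simp [outA_nil]
  | cons c cs' ih =>
    intro sc cur acc
    rw [outA_cons, outA_cons]
    split
    · rw [ih _ _ acc]
    · rw [ih _ _ (acc ++ [cur]), ih _ _ ([] ++ [cur])]
      simp

theorem outA_cur (m : Int) (cs : List (List (String × Int))) :
    ∀ sc cur, outA m cs sc cur [] = consHead cur (outA m cs sc [] []) := by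
  induction cs with
  | nil => intro sc cur; simp [outA_nil, consHead]
  | cons c cs' ih =>
    intro sc cur
    rw [outA_cons, outA_cons]
    split
    · rw [ih _ (cur ++ [c]), ih _ ([] ++ [c])]
      cases outA m cs' (sc + pvNumSeeds c) [] [] with
      | nil => simp [consHead]
      | cons g gs => simp [consHead]
    · rw [outA_acc m cs' _ [c] ([] ++ [cur]), outA_acc m cs' _ [c] ([] ++ [[]])]
      cases outA m cs' (pvNumSeeds c) [c] [] with
      | nil => simp [consHead]
      | cons g gs => simp [consHead]

theorem boundsOf_ge (m : Int) (cs : List (List (String × Int))) :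
    ∀ i sc b, b ∈ boundsOf m cs i sc → i ≤ b := by
  induction cs with
  | nil => intro i sc b hb; simp [boundsOf] at hb
  | cons c cs' ih =>
    intro i sc b hb
    simp only [boundsOf] at hb
    split at hb
    · rcases List.mem_cons.mp hb with h | h
      · omega
      · have := ih (i + 1) _ b h; omega
    · have := ih (i + 1) _ b hb; omega

theorem slice_cons (L : List (List (String × Int))) (i : Nat) (b : Int)
    (hi : i < L.length) (hb : (i : Int) + 1 ≤ b) :
    PySem.List.slice L (some (i : Int)) (some b) =
      L[i] :: PySem.List.slice L (some ((i : Int) + 1)) (some b) := by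
  have h0 : (0 : Int) ≤ (i : Int) := Int.natCast_nonneg i
  have h1 : (0 : Int) ≤ b := by omega
  have h2 : (0 : Int) ≤ (i : Int) + 1 := by omega
  rw [PySem.List.slice_toNat L h0 h1, PySem.List.slice_toNat L h2 h1]
  rw [List.drop_eq_getElem_cons (i := (i : Int).toNat) (by omega)]
  rw [show b.toNat - (i : Int).toNat = (b.toNat - ((i : Int) + 1).toNat) + 1 by omega]
  rw [List.take_succ_cons]
  congr 2 <;> omega

theorem zipSlices_cons₂ (L : List (List (String × Int))) (a b : Int) (rest : List Int) :
    zipSlices L (a :: b :: rest) =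
      PySem.List.slice L (some a) (some b) :: zipSlices L (b :: rest) := by
  simp [zipSlices]

-- one step of peeling conditions[i] off the head slice
theorem zipSlices_step (L : List (List (String × Int))) (i : Nat) (b : Int)
    (rest : List Int) (hi : i < L.length) (hb : (i : Int) + 1 ≤ b) :
    zipSlices L ((i : Int) :: b :: rest) =
      consHead [L[i]] (zipSlices L (((i : Int) + 1) :: b :: rest)) := by
  rw [zipSlices_cons₂, zipSlices_cons₂, slice_cons L i b hi hb]
  simp [consHead]

theorem slice_self (L : List (List (String × Int))) (a : Int) (ha : 0 ≤ a) :
    PySem.List.slice L (some a) (some a) = [] := by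
  rw [PySem.List.slice_toNat L ha ha]
  simp

theorem main_lemma (m : Int) (L : List (List (String × Int))) :
    ∀ (cs : List (List (String × Int))) (i : Nat) (sc : Int), L.drop i = cs → i ≤ L.length →
      zipSlices L ((i : Int) :: (boundsOf m cs (i : Int) sc ++ [(L.length : Int)])) =
        outA m cs sc [] [] := by
  intro cs
  induction cs with
  | nil =>
    intro i sc hdrop hle
    have hi : i = L.length := by
      have := List.drop_eq_nil_iff.mp hdrop
      omega
    subst hi
    rw [outA_nil, boundsOf]
    simp only [List.nil_append]
    rw [zipSlices_cons₂]
    rw [slice_self L _ (Int.natCast_nonneg _)]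
    simp [zipSlices]
  | cons c cs' ih =>
    intro i sc hdrop hle
    have hi : i < L.length := by
      by_contra h
      rw [List.drop_eq_nil_iff.mpr (by omega)] at hdrop
      simp at hdrop
    have hgc : L.drop i = L[i] :: L.drop (i + 1) := List.drop_eq_getElem_cons hi
    have hc : L[i] = c := by rw [hgc] at hdrop; exact (List.cons.injEq _ _ _ _ ▸ hdrop).1
    have hdrop' : L.drop (i + 1) = cs' := by rw [hgc] at hdrop; exact (List.cons.injEq _ _ _ _ ▸ hdrop).2
    rw [boundsOf, outA_cons]
    by_cases hov : sc + pvNumSeeds c > m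
    · -- overflow: new boundary at i, condition starts a new group
      rw [if_pos hov, if_neg (by omega)]
      obtain ⟨b, rest', hrc⟩ : ∃ b rest',
          boundsOf m cs' ((i : Int) + 1) (pvNumSeeds c) ++ [(L.length : Int)] = b :: rest' := by
        cases h : boundsOf m cs' ((i : Int) + 1) (pvNumSeeds c) ++ [(L.length : Int)] with
        | nil => simp at h
        | cons b rest' => exact ⟨b, rest', rfl⟩
      have hb : (i : Int) + 1 ≤ b := by
        have hbmem : b ∈ boundsOf m cs' ((i : Int) + 1) (pvNumSeeds c) ∨ b = (L.length : Int) := by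
          have : b ∈ boundsOf m cs' ((i : Int) + 1) (pvNumSeeds c) ++ [(L.length : Int)] := by
            rw [hrc]; exact List.mem_cons_self
          simpa using this
        rcases hbmem with h | h
        · exact boundsOf_ge m cs' _ _ _ h
        · subst h; exact_mod_cast by omega
      rw [show ((i : Int) :: boundsOf m cs' ((i : Int) + 1) (pvNumSeeds c) ++ [(L.length : Int)])
            = (i : Int) :: (b :: rest') by rw [← hrc]; rfl]
      rw [zipSlices_cons₂, slice_self L _ (Int.natCast_nonneg _)]
      rw [zipSlices_step L i b rest' hi hb]
      have hih := ih (i + 1) (pvNumSeeds c) hdrop' (by omega)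
      rw [show ((i : Int) + 1) = (((i + 1 : Nat)) : Int) by push_cast; ring] at hrc ⊢
      rw [hrc] at hih
      rw [hih, hc]
      rw [outA_acc m cs' _ [c] ([] ++ [[]]), outA_cur m cs' (pvNumSeeds c) [c]]
      simp
    · -- fits: condition joins the current group
      rw [if_neg hov, if_pos (by omega)]
      obtain ⟨b, rest', hrc⟩ : ∃ b rest',
          boundsOf m cs' ((i : Int) + 1) (sc + pvNumSeeds c) ++ [(L.length : Int)] = b :: rest' := by
        cases h : boundsOf m cs' ((i : Int) + 1) (sc + pvNumSeeds c) ++ [(L.length : Int)] with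
        | nil => simp at h
        | cons b rest' => exact ⟨b, rest', rfl⟩
      have hb : (i : Int) + 1 ≤ b := by
        have hbmem : b ∈ boundsOf m cs' ((i : Int) + 1) (sc + pvNumSeeds c) ∨ b = (L.length : Int) := by
          have : b ∈ boundsOf m cs' ((i : Int) + 1) (sc + pvNumSeeds c) ++ [(L.length : Int)] := by
            rw [hrc]; exact List.mem_cons_self
          simpa using this
        rcases hbmem with h | h
        · exact boundsOf_ge m cs' _ _ _ h
        · subst h; exact_mod_cast by omega
      rw [hrc, zipSlices_step L i b rest' hi hb]
      have hih := ih (i + 1) (sc + pvNumSeeds c) hdrop' (by omega)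
      rw [show ((i : Int) + 1) = (((i + 1 : Nat)) : Int) by push_cast; ring] at hrc ⊢
      rw [hrc] at hih
      rw [hih, hc]
      rw [outA_cur m cs' (sc + pvNumSeeds c) ([] ++ [c])]
      simp

-- B's boundary fold equals the structural boundary list (accumulator passthrough)
theorem foldB_eq (m : Int) (cs : List (List (String × Int))) :
    ∀ (j : Int) (bs : List Int) (sc : Int),
      (PySem.List.enumerate cs j).foldl (gcsStepB m) (bs, sc) =
        (bs ++ boundsOf m cs j sc, scOf m cs sc) := by
  induction cs with
  | nil => intro j bs sc; simp [PySem.List.enumerate_nil, boundsOf, scOf]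
  | cons c cs' ih =>
    intro j bs sc
    rw [PySem.List.enumerate_cons, List.foldl_cons, boundsOf, scOf]
    simp only [gcsStepB]
    split
    · rw [ih]; simp
    · rw [ih]

-- ===== VERDICT (by name: the statement is the Claim_ definition above) =====
theorem group_condition_sets_spec : Claim_equal_group_condition_sets := by
  intro conditions max_seeds _ _
  show group_condition_sets conditions max_seeds = group_condition_sets_alt conditions max_seeds
  show outA max_seeds conditions 0 [] [] =
    (let st := (PySem.List.enumerate conditions 0).foldl (gcsStepB max_seeds) ([0], 0)
     let boundaries := st.1 ++ [(conditions.length : Int)]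
     (boundaries.zip boundaries.tail).map
       (fun ab => PySem.List.slice conditions (some ab.1) (some ab.2)))
  rw [foldB_eq]
  show outA max_seeds conditions 0 [] [] =
    zipSlices conditions (([0] ++ boundsOf max_seeds conditions 0 0) ++ [(conditions.length : Int)])
  rw [show (([0] ++ boundsOf max_seeds conditions 0 0) ++ [(conditions.length : Int)])
        = (((0 : Nat) : Int) :: (boundsOf max_seeds conditions ((0 : Nat) : Int) 0 ++ [(conditions.length : Int)])) by simp]
  rw [main_lemma max_seeds conditions conditions 0 0 (by simp) (by omega)]
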